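-- pv_equiv track=rewrite | github.com/drewfoos/chess-ai | visualization/server.py | _parse_info_scores
-- ===== SOURCE A (Python) =====
-- def _parse_info_scores(lines):
--     """Extract the last-seen cp / mate / nodes / nps / depth from a list of info lines."""
--     score_cp = None
--     mate = None
--     nodes = 0
--     nps = 0
--     depth = 0
--     for line in lines:
--         parts = line.split()
--         for i, part in enumerate(parts):
--             if part == "score" and i + 2 < len(parts):
--                 if parts[i + 1] == "cp":
--                     try:
--                         score_cp = int(parts[i + 2])
--                         mate = None
--                     except ValueError:
--                         pass
--                 elif parts[i + 1] == "mate":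
--                     try:
--                         mate = int(parts[i + 2])
--                         score_cp = None
--                     except ValueError:
--                         pass
--             elif part == "nodes" and i + 1 < len(parts):
--                 try: nodes = int(parts[i + 1])
--                 except ValueError: pass
--             elif part == "nps" and i + 1 < len(parts):
--                 try: nps = int(parts[i + 1])
--                 except ValueError: pass
--             elif part == "depth" and i + 1 < len(parts):
--                 try: depth = int(parts[i + 1])
--                 except ValueError: pass
--     return score_cp, mate, nodes, nps, depth
-- ===== SOURCE B (Python) =====
-- def _try_int(s):
--     try:
--         return int(s)
--     except ValueError:
--         return None
--
--
-- def _parse_info_scores(lines):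
--     """Reverse scan: walk lines and tokens back-to-front, take the FIRST parseable
--     occurrence of each keyword (= last-seen in forward order)."""
--     score = None  # ("cp"|"mate", value) of the last successful score entry
--     nodes = None
--     nps = None
--     depth = None
--     for line in reversed(lines):
--         parts = line.split()
--         n = len(parts)
--         for i in reversed(range(n)):
--             p = parts[i]
--             if score is None and p == "score" and i + 2 < n and parts[i + 1] in ("cp", "mate"):
--                 v = _try_int(parts[i + 2])
--                 if v is not None:
--                     score = (parts[i + 1], v)
--             elif nodes is None and p == "nodes" and i + 1 < n:
--                 nodes = _try_int(parts[i + 1])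
--             elif nps is None and p == "nps" and i + 1 < n:
--                 nps = _try_int(parts[i + 1])
--             elif depth is None and p == "depth" and i + 1 < n:
--                 depth = _try_int(parts[i + 1])
--     score_cp = score[1] if score is not None and score[0] == "cp" else None
--     mate = score[1] if score is not None and score[0] == "mate" else None
--     return (score_cp, mate,
--             nodes if nodes is not None else 0,
--             nps if nps is not None else 0,
--             depth if depth is not None else 0)
-- ===== Notes on version B (the rewrite author's own statement) =====
-- stated objective: alternative
-- what changed: B scans lines and tokens back-to-front and keeps the FIRST successfully parsed occurrence of each keyword (one combined score slot), instead of A's forward scan that overwrites with every later success; defaults are filled in at the end.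
import Mathlib
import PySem

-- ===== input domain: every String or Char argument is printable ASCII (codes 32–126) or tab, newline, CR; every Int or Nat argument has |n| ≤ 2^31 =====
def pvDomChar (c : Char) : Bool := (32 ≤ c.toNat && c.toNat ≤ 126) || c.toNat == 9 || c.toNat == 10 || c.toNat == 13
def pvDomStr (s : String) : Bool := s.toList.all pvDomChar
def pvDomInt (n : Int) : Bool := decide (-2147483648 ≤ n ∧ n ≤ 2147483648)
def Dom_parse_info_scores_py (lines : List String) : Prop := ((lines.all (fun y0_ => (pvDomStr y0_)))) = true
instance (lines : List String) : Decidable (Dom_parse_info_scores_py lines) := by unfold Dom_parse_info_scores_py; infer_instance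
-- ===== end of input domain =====

-- B replaces A's forward overwrite-on-every-success scan by a reverse first-success scan
-- with defaults filled in at the end (alternative decomposition, same cost).

-- ===== PORT A =====
-- A's state: (score_cp, mate, nodes, nps, depth).  One token step of A's inner loop;
-- the guards make every pyGetD access in range, so pyGetD is exact for parts[i+1]/parts[i+2].
def pvStepTokA (parts : List String) (st : Option Int × Option Int × Int × Int × Int)
    (j : Int × String) : Option Int × Option Int × Int × Int × Int :=
  let (score_cp, mate, nodes, nps, depth) := st
  let (i, part) := j
  if part = "score" ∧ i + 2 < (parts.length : Int) then
    if PySem.List.pyGetD parts (i + 1) "" = "cp" then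
      match PySem.Int.ofStr? (PySem.List.pyGetD parts (i + 2) "") with
      | some v => (some v, none, nodes, nps, depth)
      | none => st
    else if PySem.List.pyGetD parts (i + 1) "" = "mate" then
      match PySem.Int.ofStr? (PySem.List.pyGetD parts (i + 2) "") with
      | some v => (none, some v, nodes, nps, depth)
      | none => st
    else st
  else if part = "nodes" ∧ i + 1 < (parts.length : Int) then
    match PySem.Int.ofStr? (PySem.List.pyGetD parts (i + 1) "") with
    | some v => (score_cp, mate, v, nps, depth)
    | none => st
  else if part = "nps" ∧ i + 1 < (parts.length : Int) then
    match PySem.Int.ofStr? (PySem.List.pyGetD parts (i + 1) "") with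
    | some v => (score_cp, mate, nodes, v, depth)
    | none => st
  else if part = "depth" ∧ i + 1 < (parts.length : Int) then
    match PySem.Int.ofStr? (PySem.List.pyGetD parts (i + 1) "") with
    | some v => (score_cp, mate, nodes, nps, v)
    | none => st
  else st

-- A's body for one line: split, then the forward enumerate loop.
def pvLineA (st : Option Int × Option Int × Int × Int × Int) (line : String) :
    Option Int × Option Int × Int × Int × Int :=
  (PySem.List.enumerate (PySem.Str.split₀ line)).foldl (pvStepTokA (PySem.Str.split₀ line)) st

def parse_info_scores_py (lines : List String) : Option Int × Option Int × Int × Int × Int :=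
  lines.foldl pvLineA (none, none, 0, 0, 0)

-- ===== PORT B =====
-- B's state: (score as ("cp"|"mate", v), nodes, nps, depth), each still-unset slot none.
def pvStepTokB (parts : List String)
    (st : Option (String × Int) × Option Int × Option Int × Option Int)
    (j : Int × String) : Option (String × Int) × Option Int × Option Int × Option Int :=
  let (score, nodes, nps, depth) := st
  let (i, part) := j
  if score = none ∧ part = "score" ∧ i + 2 < (parts.length : Int) ∧
      (PySem.List.pyGetD parts (i + 1) "" = "cp" ∨ PySem.List.pyGetD parts (i + 1) "" = "mate") then
    match PySem.Int.ofStr? (PySem.List.pyGetD parts (i + 2) "") with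
    | some v => (some (PySem.List.pyGetD parts (i + 1) "", v), nodes, nps, depth)
    | none => st
  else if nodes = none ∧ part = "nodes" ∧ i + 1 < (parts.length : Int) then
    (score, PySem.Int.ofStr? (PySem.List.pyGetD parts (i + 1) ""), nps, depth)
  else if nps = none ∧ part = "nps" ∧ i + 1 < (parts.length : Int) then
    (score, nodes, PySem.Int.ofStr? (PySem.List.pyGetD parts (i + 1) ""), depth)
  else if depth = none ∧ part = "depth" ∧ i + 1 < (parts.length : Int) then
    (score, nodes, nps, PySem.Int.ofStr? (PySem.List.pyGetD parts (i + 1) ""))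
  else st

-- B's body for one line: the reverse token loop ('for i in reversed(range(n))' visits
-- exactly the pairs of enumerate(parts) in reverse).
def pvLineB (st : Option (String × Int) × Option Int × Option Int × Option Int) (line : String) :
    Option (String × Int) × Option Int × Option Int × Option Int :=
  ((PySem.List.enumerate (PySem.Str.split₀ line)).reverse).foldl
    (pvStepTokB (PySem.Str.split₀ line)) st

-- fill B's option state over fallback values (Source B's trailing lines, with the fallbacks
-- of A's initial state as parameter t).
def pvFill (b : Option (String × Int) × Option Int × Option Int × Option Int)
    (t : Option Int × Option Int × Int × Int × Int) :
    Option Int × Option Int × Int × Int × Int :=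
  ((match b.1 with | some (k, v) => if k = "cp" then some v else none | none => t.1),
   (match b.1 with | some (k, v) => if k = "mate" then some v else none | none => t.2.1),
   b.2.1.getD t.2.2.1, b.2.2.1.getD t.2.2.2.1, b.2.2.2.getD t.2.2.2.2)

def parse_info_scores_py_alt (lines : List String) : Option Int × Option Int × Int × Int × Int :=
  pvFill (lines.reverse.foldl pvLineB (none, none, none, none)) (none, none, 0, 0, 0)

-- ===== PRECONDITION & SPEC =====
def Spec_parse_info_scores_py (lines : List String) (out : Option Int × Option Int × Int × Int × Int) : Prop := out = parse_info_scores_py_alt lines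
instance (lines : List String) (out : Option Int × Option Int × Int × Int × Int) : Decidable (Spec_parse_info_scores_py lines out) := by unfold Spec_parse_info_scores_py; infer_instance

-- ===== CLAIM (what is proved, stated in full; the proofs are below) =====
def Claim_equal_parse_info_scores_py : Prop := ∀ (lines : List String), Dom_parse_info_scores_py lines → Spec_parse_info_scores_py lines (parse_info_scores_py lines)

-- ===== LEMMAS AND PROOFS =====

lemma pvFill_none (t : Option Int × Option Int × Int × Int × Int) :
    pvFill (none, none, none, none) t = t := rfl

set_option maxHeartbeats 1000000 in
-- one-token commutation: applying B's step first and filling over t equals filling over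
-- t already advanced by A's step.
lemma pvStep_commute (parts : List String)
    (b : Option (String × Int) × Option Int × Option Int × Option Int)
    (t : Option Int × Option Int × Int × Int × Int) (j : Int × String) :
    pvFill (pvStepTokB parts b j) t = pvFill b (pvStepTokA parts t j) := by
  obtain ⟨sc, nd, np, dp⟩ := b
  obtain ⟨cp0, m0, nd0, np0, dp0⟩ := t
  obtain ⟨i, p⟩ := j
  simp only [pvStepTokB, pvStepTokA]
  by_cases hs : p = "score"
  · subst hs
    by_cases hb : i + 2 < (parts.length : Int)
    · by_cases hc : PySem.List.pyGetD parts (i + 1) "" = "cp"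
      · rcases sc with _ | ⟨k0, v0⟩ <;>
          cases h2 : PySem.Int.ofStr? (PySem.List.pyGetD parts (i + 2) "") <;>
          simp [pvFill, hb, hc, h2]
      · by_cases hm : PySem.List.pyGetD parts (i + 1) "" = "mate"
        · rcases sc with _ | ⟨k0, v0⟩ <;>
            cases h2 : PySem.Int.ofStr? (PySem.List.pyGetD parts (i + 2) "") <;>
            simp [pvFill, hb, hc, hm, h2]
        · simp [pvFill, hb, hc, hm]
    · simp [pvFill, hb]
  · by_cases hn : p = "nodes"
    · subst hn
      by_cases hb : i + 1 < (parts.length : Int)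
      · rcases nd with _ | n0 <;>
          cases h1 : PySem.Int.ofStr? (PySem.List.pyGetD parts (i + 1) "") <;>
          simp [pvFill, hb, h1]
      · simp [pvFill, hb]
    · by_cases hq : p = "nps"
      · subst hq
        by_cases hb : i + 1 < (parts.length : Int)
        · rcases np with _ | q0 <;>
            cases h1 : PySem.Int.ofStr? (PySem.List.pyGetD parts (i + 1) "") <;>
            simp [pvFill, hb, h1]
        · simp [pvFill, hb]
      · by_cases hd : p = "depth"
        · subst hd
          by_cases hb : i + 1 < (parts.length : Int)
          · rcases dp with _ | r0 <;>
              cases h1 : PySem.Int.ofStr? (PySem.List.pyGetD parts (i + 1) "") <;>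
              simp [pvFill, hb, h1]
          · simp [pvFill, hb]
        · simp [pvFill, hs, hn, hq, hd]

lemma pvFold_commute (parts : List String) (js : List (Int × String))
    (b : Option (String × Int) × Option Int × Option Int × Option Int)
    (t : Option Int × Option Int × Int × Int × Int) :
    pvFill (js.reverse.foldl (pvStepTokB parts) b) t =
      pvFill b (js.foldl (pvStepTokA parts) t) := by
  induction js generalizing b t with
  | nil => rfl
  | cons j js ih =>
    simp only [List.reverse_cons, List.foldl_append, List.foldl_cons, List.foldl_nil]
    rw [pvStep_commute, ih]

lemma pvLine_commute (b : Option (String × Int) × Option Int × Option Int × Option Int)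
    (t : Option Int × Option Int × Int × Int × Int) (line : String) :
    pvFill (pvLineB b line) t = pvFill b (pvLineA t line) := by
  simp only [pvLineB, pvLineA]
  exact pvFold_commute _ _ _ _

lemma pvLines_commute (lines : List String)
    (b : Option (String × Int) × Option Int × Option Int × Option Int)
    (t : Option Int × Option Int × Int × Int × Int) :
    pvFill (lines.reverse.foldl pvLineB b) t = pvFill b (lines.foldl pvLineA t) := by
  induction lines generalizing b t with
  | nil => rfl
  | cons l ls ih =>
    simp only [List.reverse_cons, List.foldl_append, List.foldl_cons, List.foldl_nil]
    rw [pvLine_commute, ih]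

-- ===== VERDICT (by name: the statement is the Claim_ definition above) =====
theorem parse_info_scores_py_spec : Claim_equal_parse_info_scores_py := by
  intro lines _
  unfold Spec_parse_info_scores_py parse_info_scores_py parse_info_scores_py_alt
  rw [pvLines_commute, pvFill_none]
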